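-- pv_equiv track=rewrite | github.com/rajgupt/OpenMDAO | openmdao/core/problem.py | _get_implicit_connections
-- ===== SOURCE A (Python) =====
-- def _get_implicit_connections(params_dict, unknowns_dict):
--     """
--     Finds all matches between relative names of parameters and
--     unknowns.  Any matches imply an implicit connection.  All
--     connections are expressed using absolute pathnames.
--
--     This should only be called using params and unknowns from the
--     top level `Group` in the system tree.
--
--     Parameters
--     ----------
--     params_dict : dict
--         dictionary of metadata for all parameters in this `Group`
--
--     unknowns_dict : dict
--         dictionary of metadata for all unknowns in this `Group`
--
--     Returns
--     -------
--     dict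
--         implicit connections in this `Group`, represented as a mapping
--         from the pathname of the target to the pathname of the source
--
--     Raises
--     ------
--     RuntimeError
--         if a a promoted variable name matches multiple unknowns
--     """
--
--     # collect all absolute names that map to each relative name
--     abs_unknowns = {}
--     for abs_name, u in unknowns_dict.items():
--         abs_unknowns.setdefault(u['relative_name'], []).append(abs_name)
--
--     abs_params = {}
--     for abs_name, p in params_dict.items():
--         abs_params.setdefault(p['relative_name'], []).append(abs_name)
--
--     # check if any relative names correspond to mutiple unknowns
--     for name, lst in abs_unknowns.items():
--         if len(lst) > 1:
--             raise RuntimeError("Promoted name '%s' matches multiple unknowns: %s" %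
--                                (name, lst))
--
--     connections = {}
--     for uname, uabs in abs_unknowns.items():
--         pabs = abs_params.get(uname, ())
--         for p in pabs:
--             connections[p] = uabs[0]
--
--     return connections
-- ===== SOURCE B (Python) =====
-- def _get_implicit_connections(params_dict, unknowns_dict):
--     # promoted (relative) names of all unknowns, in order
--     rels = [u['relative_name'] for u in unknowns_dict.values()]
--
--     # a promoted name appearing twice among the unknowns is an error
--     for rel in rels:
--         if rels.count(rel) > 1:
--             dups = [a for a, u in unknowns_dict.items()
--                     if u['relative_name'] == rel]
--             raise RuntimeError("Promoted name '%s' matches multiple unknowns: %s" %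
--                                (rel, dups))
--
--     # no index dicts at all: join unknowns and params by a direct nested scan
--     connections = {}
--     for abs_u, u in unknowns_dict.items():
--         rel = u['relative_name']
--         for abs_p, p in params_dict.items():
--             if p['relative_name'] == rel:
--                 connections[abs_p] = abs_u
--     return connections
-- ===== Notes on version B (the rewrite author's own statement) =====
-- stated objective: simpler
-- what changed: Drops both grouping dicts: the duplicate check is done on a plain list of promoted unknown names, and connections are built by a direct nested scan of unknowns against params instead of building two indexes and joining through them.
import Mathlib
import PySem

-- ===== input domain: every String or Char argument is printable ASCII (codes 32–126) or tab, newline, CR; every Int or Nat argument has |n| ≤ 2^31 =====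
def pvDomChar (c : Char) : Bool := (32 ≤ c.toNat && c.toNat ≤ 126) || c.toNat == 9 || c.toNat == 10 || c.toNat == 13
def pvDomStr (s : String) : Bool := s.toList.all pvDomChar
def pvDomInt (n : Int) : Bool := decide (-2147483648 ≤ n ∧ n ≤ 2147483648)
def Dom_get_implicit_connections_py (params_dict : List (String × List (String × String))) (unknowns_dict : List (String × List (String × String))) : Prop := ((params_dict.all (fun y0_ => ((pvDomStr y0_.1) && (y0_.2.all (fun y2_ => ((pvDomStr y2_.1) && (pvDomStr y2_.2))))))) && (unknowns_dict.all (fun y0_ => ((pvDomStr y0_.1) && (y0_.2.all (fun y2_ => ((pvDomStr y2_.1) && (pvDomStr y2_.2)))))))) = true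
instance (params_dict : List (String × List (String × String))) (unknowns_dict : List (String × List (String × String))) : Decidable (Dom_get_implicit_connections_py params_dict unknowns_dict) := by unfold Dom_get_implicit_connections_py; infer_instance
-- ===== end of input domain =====

-- B drops both of A's grouping dicts: the duplicate check runs on a plain list of
-- promoted names and connections come from a direct nested scan of unknowns × params.
-- Same return value on Pre_ (where A returns); no speed claim.

-- ===== PORT A =====
-- p['relative_name'] (Python dict lookup = first match; the default is never hit inside Pre_)
def pvRelA (m : List (String × String)) : String :=
  ((m.find? (fun kv => kv.1 == "relative_name")).map (·.2)).getD ""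

-- one step of `d.setdefault(rel, []).append(abs_name)` = d[rel] = d.get(rel, []) + [abs_name]
def pvGroupStep (d : PySem.Dict String (List String)) (ap : String × List (String × String)) :
    PySem.Dict String (List String) :=
  d.modify (pvRelA ap.2) [] (· ++ [ap.1])

def get_implicit_connections_py (params_dict : List (String × List (String × String))) (unknowns_dict : List (String × List (String × String))) : List (String × String) :=
  let abs_unknowns : PySem.Dict String (List String) :=
    unknowns_dict.foldl pvGroupStep PySem.Dict.empty
  let abs_params : PySem.Dict String (List String) :=
    params_dict.foldl pvGroupStep PySem.Dict.empty
  -- (the len(lst) > 1 check raises; such inputs are outside Pre_)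
  let connections : PySem.Dict String String :=
    abs_unknowns.items.foldl (fun c ua =>
      (abs_params.getD ua.1 []).foldl (fun c2 p => c2.insert p (PySem.List.pyGetD ua.2 0 "")) c)
      PySem.Dict.empty
  connections.items

-- ===== PORT B =====
-- u['relative_name'], written as B's direct first-match scan of the metadata pairs
def pvFindRel : List (String × String) → String
  | [] => ""
  | kv :: rest => if kv.1 == "relative_name" then kv.2 else pvFindRel rest

-- B's inner loop: scan params_dict once, connecting every param promoted to `rel` to `src`
def pvScanParams (rel src : String) :
    List (String × List (String × String)) → PySem.Dict String String → PySem.Dict String String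
  | [], c => c
  | ap :: rest, c =>
      pvScanParams rel src rest (if pvFindRel ap.2 == rel then c.insert ap.1 src else c)

-- B's outer loop over the unknowns themselves (the duplicate check raises; outside Pre_)
def pvConnLoop (params_dict : List (String × List (String × String))) :
    List (String × List (String × String)) → PySem.Dict String String → PySem.Dict String String
  | [], c => c
  | au :: rest, c => pvConnLoop params_dict rest (pvScanParams (pvFindRel au.2) au.1 params_dict c)

def get_implicit_connections_py_alt (params_dict : List (String × List (String × String))) (unknowns_dict : List (String × List (String × String))) : List (String × String) :=
  (pvConnLoop params_dict unknowns_dict PySem.Dict.empty).items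

-- ===== PRECONDITION & SPEC =====
-- Pre_ excludes exactly the inputs where Python A raises: a metadata dict missing the
-- 'relative_name' key (KeyError) or two unknowns promoted to the same relative name (RuntimeError).
def Pre_get_implicit_connections_py (params_dict : List (String × List (String × String))) (unknowns_dict : List (String × List (String × String))) : Prop :=
  (params_dict.all (fun ap => (ap.2.find? (fun kv => kv.1 == "relative_name")).isSome)) = true ∧
  (unknowns_dict.all (fun au => (au.2.find? (fun kv => kv.1 == "relative_name")).isSome)) = true ∧
  (unknowns_dict.map (fun au => pvRelA au.2)).Nodup
instance (params_dict : List (String × List (String × String))) (unknowns_dict : List (String × List (String × String))) : Decidable (Pre_get_implicit_connections_py params_dict unknowns_dict) := by unfold Pre_get_implicit_connections_py; infer_instance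

def pvWitness_get_implicit_connections_py : (List (String × List (String × String))) × (List (String × List (String × String))) :=
  ([("comp.x", [("relative_name", "x")]), ("comp.y", [("relative_name", "y")])],
   [("src.x", [("relative_name", "x")])])

def Spec_get_implicit_connections_py (params_dict : List (String × List (String × String))) (unknowns_dict : List (String × List (String × String))) (out : List (String × String)) : Prop := out = get_implicit_connections_py_alt params_dict unknowns_dict
instance (params_dict : List (String × List (String × String))) (unknowns_dict : List (String × List (String × String))) (out : List (String × String)) : Decidable (Spec_get_implicit_connections_py params_dict unknowns_dict out) := by unfold Spec_get_implicit_connections_py; infer_instance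

-- ===== CLAIM (what is proved, stated in full; the proofs are below) =====
def Claim_equal_get_implicit_connections_py : Prop := ∀ (params_dict : List (String × List (String × String))) (unknowns_dict : List (String × List (String × String))), Dom_get_implicit_connections_py params_dict unknowns_dict → Pre_get_implicit_connections_py params_dict unknowns_dict → Spec_get_implicit_connections_py params_dict unknowns_dict (get_implicit_connections_py params_dict unknowns_dict)

-- ===== LEMMAS AND PROOFS =====

-- B's first-match scan computes the same value as A's find?-based lookup
lemma pvFindRel_eq (m : List (String × String)) : pvFindRel m = pvRelA m := by
  induction m with
  | nil => rfl
  | cons kv rest ih =>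
      simp only [pvFindRel, pvRelA, List.find?_cons]
      by_cases h : kv.1 == "relative_name" <;> simp [h, ih, pvRelA]

-- the group for key u in A's dicts is exactly the entries whose relative name is u, in order
lemma pvGroup_getD (l : List (String × List (String × String))) (u : String) :
    (l.foldl pvGroupStep PySem.Dict.empty).getD u []
      = (l.filter (fun ap => pvRelA ap.2 == u)).map (·.1) := by
  have h := PySem.Dict.getD_foldl_modify_append
      (l := l.map (fun ap => (pvRelA ap.2, ap.1)))
      (d := (PySem.Dict.empty : PySem.Dict String (List String))) (c := u)
  rw [List.foldl_map] at h
  unfold pvGroupStep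
  rw [h]
  simp [List.filter_map, Function.comp_def]

-- Dict.modify on an absent key appends one fresh item
lemma pvModify_fresh (d : PySem.Dict String (List String)) (k : String)
    (f : List String → List String) (h : d.contains k = false) :
    (d.modify k [] f).items = d.items ++ [(k, f [])] := by
  simp [PySem.Dict.modify, PySem.Dict.getD_of_not_contains _ _ h,
        PySem.Dict.items_insert_of_not_contains _ _ h]

-- with pairwise-distinct relative names, A's unknown-grouping loop just appends singleton groups
lemma pvGroup_items (l : List (String × List (String × String)))
    (d : PySem.Dict String (List String))
    (hnd : (l.map (fun au => pvRelA au.2)).Nodup)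
    (hfresh : ∀ au ∈ l, d.contains (pvRelA au.2) = false) :
    (l.foldl pvGroupStep d).items = d.items ++ l.map (fun au => (pvRelA au.2, [au.1])) := by
  induction l generalizing d with
  | nil => simp
  | cons au rest ih =>
      simp only [List.map_cons, List.nodup_cons, List.mem_map] at hnd
      have hfr : d.contains (pvRelA au.2) = false := hfresh au (by simp)
      have hstep : (pvGroupStep d au).items = d.items ++ [(pvRelA au.2, [au.1])] := by
        simpa using pvModify_fresh d (pvRelA au.2) (· ++ [au.1]) hfr
      have hfresh' : ∀ au' ∈ rest, (pvGroupStep d au).contains (pvRelA au'.2) = false := by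
        intro au' hmem
        have hne : pvRelA au'.2 ≠ pvRelA au.2 := by
          intro he; exact hnd.1 ⟨au', hmem, he⟩
        simp only [pvGroupStep, PySem.Dict.modify, PySem.Dict.contains_insert]
        simp [hne, hfresh au' (by simp [hmem])]
      rw [List.foldl_cons, ih (pvGroupStep d au) hnd.2 hfresh', hstep]
      simp

-- B's inner recursion is the fold A's inner loop reduces to
lemma pvScanParams_eq_foldl (rel src : String)
    (l : List (String × List (String × String))) (c : PySem.Dict String String) :
    pvScanParams rel src l c
      = l.foldl (fun c2 ap => if pvRelA ap.2 == rel then c2.insert ap.1 src else c2) c := by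
  induction l generalizing c with
  | nil => rfl
  | cons ap rest ih => simp [pvScanParams, ih, pvFindRel_eq]

-- A's inner loop over the group = B's direct scan of params
lemma pvInner (params_dict : List (String × List (String × String))) (u v : String)
    (c : PySem.Dict String String) :
    ((params_dict.foldl pvGroupStep PySem.Dict.empty).getD u []).foldl
        (fun c2 p => c2.insert p v) c
      = pvScanParams u v params_dict c := by
  rw [pvGroup_getD, List.foldl_map, List.foldl_filter, pvScanParams_eq_foldl]

-- B's outer recursion as a fold
lemma pvConnLoop_eq_foldl (params_dict l : List (String × List (String × String)))
    (c : PySem.Dict String String) :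
    pvConnLoop params_dict l c
      = l.foldl (fun c au => pvScanParams (pvRelA au.2) au.1 params_dict c) c := by
  induction l generalizing c with
  | nil => rfl
  | cons au rest ih => simp [pvConnLoop, ih, pvFindRel_eq]

-- ===== VERDICT (by name: the statement is the Claim_ definition above) =====
theorem get_implicit_connections_py_spec : Claim_equal_get_implicit_connections_py := by
  intro params_dict unknowns_dict _ hpre
  obtain ⟨-, -, hnd⟩ := hpre
  show get_implicit_connections_py params_dict unknowns_dict
      = get_implicit_connections_py_alt params_dict unknowns_dict
  unfold get_implicit_connections_py get_implicit_connections_py_alt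
  dsimp only
  rw [pvGroup_items unknowns_dict PySem.Dict.empty hnd (by simp),
      pvConnLoop_eq_foldl]
  have h0 : (PySem.Dict.empty : PySem.Dict String (List String)).items = [] := rfl
  rw [h0, List.nil_append, List.foldl_map]
  have hfun : (fun (c : PySem.Dict String String) (au : String × List (String × String)) =>
        ((params_dict.foldl pvGroupStep PySem.Dict.empty).getD (pvRelA au.2, [au.1]).1 []).foldl
          (fun c2 p => c2.insert p (PySem.List.pyGetD (pvRelA au.2, [au.1]).2 0 "")) c)
      = (fun c au => pvScanParams (pvRelA au.2) au.1 params_dict c) := by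
    funext c au
    simpa [PySem.List.pyGetD] using pvInner params_dict (pvRelA au.2) au.1 c
  rw [hfun]
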